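-- pv_equiv track=rewrite | github.com/wlswotmd/gef | dev/update-syscalls/update-syscalls.py | replace_lines1
-- ===== SOURCE A (Python) =====
-- def replace_lines1(replace_rules, lines):
--     for rule in replace_rules:
--         before, after = rule
--         if before not in lines:
--             continue
--         idx = lines.index(before)
--         lines[idx] = "!" + after
--     return lines
-- ===== SOURCE B (Python) =====
-- def replace_lines1(replace_rules, lines):
--     # Index every line's occurrence positions once, then resolve each rule by
--     # dict lookup instead of scanning `lines`; positions are kept sorted.
--     pos = {}
--     for i, line in enumerate(lines):
--         pos.setdefault(line, []).append(i)
--     for before, after in replace_rules: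
--         lst = pos.get(before)
--         if not lst:
--             continue
--         idx = lst.pop(0)
--         new = "!" + after
--         lines[idx] = new
--         lst2 = pos.setdefault(new, [])
--         k = 0
--         while k < len(lst2) and lst2[k] < idx:
--             k += 1
--         lst2.insert(k, idx)
--     return lines
-- ===== Notes on version B (the rewrite author's own statement) =====
-- stated objective: faster
-- what changed: B builds a dict mapping each line to its sorted list of occurrence indices once, then resolves each rule by dict lookup (popping the first index and re-filing the replaced index under the new value), removing A's per-rule membership scan and .index scan over lines.
import Mathlib
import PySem

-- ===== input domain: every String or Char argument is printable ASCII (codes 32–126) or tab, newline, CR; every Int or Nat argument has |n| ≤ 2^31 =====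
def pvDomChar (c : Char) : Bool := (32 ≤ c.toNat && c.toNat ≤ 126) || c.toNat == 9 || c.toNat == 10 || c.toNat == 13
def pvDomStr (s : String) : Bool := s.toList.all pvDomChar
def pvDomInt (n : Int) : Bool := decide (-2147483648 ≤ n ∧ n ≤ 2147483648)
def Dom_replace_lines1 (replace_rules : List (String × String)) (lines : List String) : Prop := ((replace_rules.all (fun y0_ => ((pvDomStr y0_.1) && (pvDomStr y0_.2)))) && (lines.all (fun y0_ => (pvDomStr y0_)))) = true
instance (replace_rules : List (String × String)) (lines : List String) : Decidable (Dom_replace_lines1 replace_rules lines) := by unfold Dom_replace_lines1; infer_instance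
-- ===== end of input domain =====

-- B replaces A's per-rule `in`/`.index` scans of `lines` by a dict from each line to its
-- sorted occurrence-index list, built once and updated on each mutation (faster; both
-- A and the Python B mutate `lines` in place — equivalence here is about the return value).

-- ===== PORT A =====
def pvStepA (lines : List String) (rule : String × String) : List String :=
  if lines.contains rule.1 then
    match PySem.List.index? lines rule.1 with
    | some idx => lines.set idx ("!" ++ rule.2)
    | none => lines
  else lines

def replace_lines1 (replace_rules : List (String × String)) (lines : List String) : List String :=
  replace_rules.foldl pvStepA lines

-- ===== PORT B =====
-- hand-written insertion into a sorted list (Source B's while-loop + insert), exact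
def pvInsort (idx : Nat) : List Nat → List Nat
  | [] => [idx]
  | x :: xs => if x < idx then x :: pvInsort idx xs else idx :: x :: xs

-- Source B's first loop: for i, line in enumerate(lines): pos.setdefault(line, []).append(i)
def pvBuildPos : List String → Nat → PySem.Dict String (List Nat) → PySem.Dict String (List Nat)
  | [], _, m => m
  | x :: xs, n, m => pvBuildPos xs (n + 1) (m.insert x ((m.getD x []) ++ [n]))

def pvStepB (st : List String × PySem.Dict String (List Nat)) (rule : String × String) :
    List String × PySem.Dict String (List Nat) :=
  match st.2.get? rule.1 with
  | none => st
  | some [] => st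
  | some (idx :: rest) =>
      let new := "!" ++ rule.2
      let m1 := st.2.insert rule.1 rest
      let lines' := st.1.set idx new
      (lines', m1.insert new (pvInsort idx (m1.getD new [])))

def replace_lines1_alt (replace_rules : List (String × String)) (lines : List String) : List String :=
  (replace_rules.foldl pvStepB (lines, pvBuildPos lines 0 PySem.Dict.empty)).1

-- ===== PRECONDITION & SPEC =====
def Spec_replace_lines1 (replace_rules : List (String × String)) (lines : List String) (out : List String) : Prop := out = replace_lines1_alt replace_rules lines
instance (replace_rules : List (String × String)) (lines : List String) (out : List String) : Decidable (Spec_replace_lines1 replace_rules lines out) := by unfold Spec_replace_lines1; infer_instance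

-- ===== CLAIM (what is proved, stated in full; the proofs are below) =====
def Claim_equal_replace_lines1 : Prop := ∀ (replace_rules : List (String × String)) (lines : List String), Dom_replace_lines1 replace_rules lines → Spec_replace_lines1 replace_rules lines (replace_lines1 replace_rules lines)

-- ===== LEMMAS AND PROOFS =====

-- occurrence indices of s in lines, in increasing order
def pvOcc (s : String) : List String → List Nat
  | [] => []
  | x :: xs => (if x = s then [0] else []) ++ (pvOcc s xs).map (· + 1)

def pvINV (lines : List String) (m : PySem.Dict String (List Nat)) : Prop :=
  ∀ s, m.getD s [] = pvOcc s lines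

lemma pvOcc_eq_nil_iff (s : String) (lines : List String) : pvOcc s lines = [] ↔ s ∉ lines := by
  induction lines with
  | nil => simp [pvOcc]
  | cons x xs ih =>
    by_cases h : x = s <;> simp [pvOcc, h, ih, eq_comm (a := s)]

lemma pvIndex?_of_occ (s : String) :
    ∀ (lines : List String) (idx : Nat) (rest : List Nat), pvOcc s lines = idx :: rest →
      PySem.List.index? lines s = some idx := by
  intro lines
  induction lines with
  | nil => intro idx rest h; simp [pvOcc] at h
  | cons x xs ih =>
    intro idx rest h
    by_cases hx : x = s
    · subst hx
      simp [pvOcc] at h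
      rw [PySem.List.index?_cons_self]
      simp [← h.1]
    · simp [pvOcc, hx] at h
      rcases List.map_eq_cons_iff.mp h with ⟨i', r', hocc, hi, hr⟩
      rw [PySem.List.index?_cons_of_ne xs hx, ih i' r' hocc]
      simp [← hi]

lemma pvInsort_of_forall_lt (idx : Nat) (l : List Nat) (h : ∀ y ∈ l, idx < y) :
    pvInsort idx l = idx :: l := by
  cases l with
  | nil => rfl
  | cons x xs =>
    have : ¬ x < idx := by have := h x (by simp); omega
    simp [pvInsort, this]

lemma pvInsort_zero_map (l : List Nat) : pvInsort 0 (l.map (· + 1)) = 0 :: l.map (· + 1) := by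
  apply pvInsort_of_forall_lt
  intro y hy
  rcases List.mem_map.mp hy with ⟨z, _, hz⟩
  omega

lemma pvInsort_succ_map (i : Nat) (l : List Nat) :
    pvInsort (i + 1) (l.map (· + 1)) = (pvInsort i l).map (· + 1) := by
  induction l with
  | nil => rfl
  | cons x xs ih =>
    by_cases h : x < i
    · simp [pvInsort, h, ih]
    · have : ¬ x + 1 < i + 1 := by omega
      simp [pvInsort, h, this]

lemma pvInsort_succ_zero_cons (i : Nat) (l : List Nat) :
    pvInsort (i + 1) (0 :: l) = 0 :: pvInsort (i + 1) l := by
  simp [pvInsort]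

-- the three facts about pvOcc after lines[idx] = v, when idx is the FIRST occurrence of b
lemma pvOcc_set_ne (b v s : String) (hsv : s ≠ v) (hsb : s ≠ b) :
    ∀ (lines : List String) (idx : Nat) (rest : List Nat), pvOcc b lines = idx :: rest →
      pvOcc s (lines.set idx v) = pvOcc s lines := by
  intro lines
  induction lines with
  | nil => intro idx rest h; simp [pvOcc] at h
  | cons x xs ih =>
    intro idx rest h
    by_cases hx : x = b
    · subst hx
      simp [pvOcc] at h
      rw [← h.1]
      simp [pvOcc, hsb.symm, Ne.symm hsv]
    · simp [pvOcc, hx] at h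
      rcases List.map_eq_cons_iff.mp h with ⟨i', r', hocc, hi, hr⟩
      rw [← hi]
      simp [pvOcc, ih i' r' hocc]

lemma pvOcc_set_b (b v : String) (hbv : b ≠ v) :
    ∀ (lines : List String) (idx : Nat) (rest : List Nat), pvOcc b lines = idx :: rest →
      pvOcc b (lines.set idx v) = rest := by
  intro lines
  induction lines with
  | nil => intro idx rest h; simp [pvOcc] at h
  | cons x xs ih =>
    intro idx rest h
    by_cases hx : x = b
    · subst hx
      simp [pvOcc] at h
      rw [← h.1, ← h.2]
      simp [pvOcc, Ne.symm hbv]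
    · simp [pvOcc, hx] at h
      rcases List.map_eq_cons_iff.mp h with ⟨i', r', hocc, hi, hr⟩
      rw [← hi, ← hr]
      simp [pvOcc, hx, ih i' r' hocc]

lemma pvOcc_set_v (b v : String) :
    ∀ (lines : List String) (idx : Nat) (rest : List Nat), pvOcc b lines = idx :: rest →
      pvOcc v (lines.set idx v) = pvInsort idx (if b = v then rest else pvOcc v lines) := by
  intro lines
  induction lines with
  | nil => intro idx rest h; simp [pvOcc] at h
  | cons x xs ih =>
    intro idx rest h
    by_cases hx : x = b
    · subst hx
      simp [pvOcc] at h
      rw [← h.1, ← h.2]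
      by_cases hbv : x = v
      · subst hbv
        simp [pvOcc, pvInsort_zero_map]
      · simp [pvOcc, hbv, pvInsort_zero_map]
    · simp [pvOcc, hx] at h
      rcases List.map_eq_cons_iff.mp h with ⟨i', r', hocc, hi, hr⟩
      rw [← hi, ← hr]
      have hset : (x :: xs).set (i' + 1) v = x :: xs.set i' v := rfl
      rw [hset]
      by_cases hxv : x = v
      · subst hxv
        have hbv : ¬ b = x := fun hh => hx hh.symm
        rw [show pvOcc x (x :: xs.set i' x) = 0 :: (pvOcc x (xs.set i' x)).map (· + 1) by
              simp [pvOcc]]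
        rw [show pvOcc x (x :: xs) = 0 :: (pvOcc x xs).map (· + 1) by simp [pvOcc]]
        rw [ih i' r' hocc, if_neg hbv, if_neg hbv, pvInsort_succ_zero_cons, pvInsort_succ_map]
      · rw [show pvOcc v (x :: xs.set i' v) = (pvOcc v (xs.set i' v)).map (· + 1) by
              simp [pvOcc, hxv]]
        rw [ih i' r' hocc]
        by_cases hbv : b = v
        · rw [if_pos hbv, if_pos hbv]
          exact (pvInsort_succ_map i' r').symm
        · rw [if_neg hbv, if_neg hbv,
              show pvOcc v (x :: xs) = (pvOcc v xs).map (· + 1) by simp [pvOcc, hxv],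
              pvInsort_succ_map]

lemma pvStepB_fst (lines : List String) (m : PySem.Dict String (List Nat))
    (rule : String × String) (hinv : pvINV lines m) :
    (pvStepB (lines, m) rule).1 = pvStepA lines rule := by
  have hocc := hinv rule.1
  rw [PySem.Dict.getD_eq_get?_getD] at hocc
  unfold pvStepB pvStepA
  cases hg : m.get? rule.1 with
  | none =>
    have : pvOcc rule.1 lines = [] := by rw [← hocc, hg]; rfl
    have hmem : rule.1 ∉ lines := (pvOcc_eq_nil_iff _ _).mp this
    simp [hmem]
  | some lst =>
    cases lst with
    | nil =>
      have : pvOcc rule.1 lines = [] := by rw [← hocc, hg]; rfl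
      have hmem : rule.1 ∉ lines := (pvOcc_eq_nil_iff _ _).mp this
      simp [hmem]
    | cons idx rest =>
      have hocc' : pvOcc rule.1 lines = idx :: rest := by rw [← hocc, hg]; rfl
      have hmem : rule.1 ∈ lines := by
        by_contra hnot
        rw [(pvOcc_eq_nil_iff _ _).mpr hnot] at hocc'
        simp at hocc'
      rw [pvIndex?_of_occ rule.1 lines idx rest hocc']
      simp [hmem]

lemma pvStepB_inv (lines : List String) (m : PySem.Dict String (List Nat))
    (rule : String × String) (hinv : pvINV lines m) :
    pvINV (pvStepB (lines, m) rule).1 (pvStepB (lines, m) rule).2 := by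
  have hocc := hinv rule.1
  rw [PySem.Dict.getD_eq_get?_getD] at hocc
  unfold pvStepB
  cases hg : m.get? rule.1 with
  | none => simpa using hinv
  | some lst =>
    cases lst with
    | nil => simpa using hinv
    | cons idx rest =>
      have hocc' : pvOcc rule.1 lines = idx :: rest := by rw [← hocc, hg]; rfl
      intro s
      simp only [PySem.Dict.getD_insert]
      by_cases hs1 : s = "!" ++ rule.2
      · subst hs1
        rw [if_pos rfl, pvOcc_set_v rule.1 _ lines idx rest hocc']
        by_cases hb : rule.1 = "!" ++ rule.2
        · rw [if_pos hb.symm, if_pos hb]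
        · rw [if_neg (fun hh => hb hh.symm), if_neg hb, hinv ("!" ++ rule.2)]
      · rw [if_neg hs1]
        by_cases hs2 : s = rule.1
        · subst hs2
          rw [if_pos rfl, pvOcc_set_b rule.1 ("!" ++ rule.2) hs1 lines idx rest hocc']
        · rw [if_neg hs2, hinv s, pvOcc_set_ne rule.1 _ s hs1 hs2 lines idx rest hocc']

lemma pvFoldl_eq (rules : List (String × String)) :
    ∀ (lines : List String) (m : PySem.Dict String (List Nat)), pvINV lines m →
      (rules.foldl pvStepB (lines, m)).1 = rules.foldl pvStepA lines := by
  induction rules with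
  | nil => intro lines m _; rfl
  | cons r rs ih =>
    intro lines m hinv
    have h1 := pvStepB_fst lines m r hinv
    have h2 := pvStepB_inv lines m r hinv
    simp only [List.foldl_cons]
    rw [show pvStepB (lines, m) r = ((pvStepB (lines, m) r).1, (pvStepB (lines, m) r).2) from rfl,
        ih _ _ h2, h1]

lemma pvMapShift (l : List Nat) (n : Nat) :
    (l.map (· + 1)).map (· + n) = l.map (· + (n + 1)) := by
  induction l with
  | nil => rfl
  | cons a l ih => simp only [List.map_cons, ih]; congr 1; omega

lemma pvBuildPos_spec :
    ∀ (lines : List String) (n : Nat) (m : PySem.Dict String (List Nat)) (s : String),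
      (pvBuildPos lines n m).getD s [] = m.getD s [] ++ (pvOcc s lines).map (· + n) := by
  intro lines
  induction lines with
  | nil => intro n m s; simp [pvBuildPos, pvOcc]
  | cons x xs ih =>
    intro n m s
    rw [pvBuildPos, ih]
    rw [PySem.Dict.getD_insert]
    by_cases hx : s = x
    · subst hx
      rw [if_pos rfl,
          show pvOcc s (s :: xs) = [0] ++ (pvOcc s xs).map (· + 1) by simp [pvOcc],
          List.map_append, pvMapShift]
      simp
    · rw [if_neg hx,
          show pvOcc s (x :: xs) = (pvOcc s xs).map (· + 1) by
            simp [pvOcc, Ne.symm hx],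
          pvMapShift]

lemma pvINV_init (lines : List String) : pvINV lines (pvBuildPos lines 0 PySem.Dict.empty) := by
  intro s
  rw [pvBuildPos_spec]
  simp

-- ===== VERDICT (by name: the statement is the Claim_ definition above) =====
theorem replace_lines1_spec : Claim_equal_replace_lines1 := by
  intro rules lines _
  unfold Spec_replace_lines1 replace_lines1 replace_lines1_alt
  exact (pvFoldl_eq rules lines _ (pvINV_init lines)).symm
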